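-- pv_equiv track=rewrite | github.com/paiml/depyler | examples/hard_tree_array.py | sum_at_level
-- ===== SOURCE A (Python) =====
-- def sum_at_level(tree: list[int], level: int, sentinel: int) -> int:
--     """Sum of all nodes at a given level (0-indexed)."""
--     start: int = 0
--     lv: int = 0
--     nodes_at_level: int = 1
--     while lv < level:
--         start = start + nodes_at_level
--         nodes_at_level = nodes_at_level * 2
--         lv = lv + 1
--     total: int = 0
--     i: int = start
--     while i < start + nodes_at_level and i < len(tree):
--         if tree[i] != sentinel:
--             total = total + tree[i]
--         i = i + 1
--     return total
-- ===== SOURCE B (Python) =====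
-- def sum_at_level(tree: list[int], level: int, sentinel: int) -> int:
--     """Sum of all nodes at a given level (0-indexed)."""
--     if level <= 0:
--         start, count = 0, 1
--     else:
--         start, count = 2 ** level - 1, 2 ** level
--     return sum(x for x in tree[start:start + count] if x != sentinel)
-- ===== Notes on version B (the rewrite author's own statement) =====
-- stated objective: faster
-- what changed: Replaces A's doubling while-loop and index-guarded elementwise summation loop with a closed-form index range (start = 2**level - 1, count = 2**level; level <= 0 gives start=0, count=1) and a filtered sum over a slice that clips at len(tree).
import Mathlib
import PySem

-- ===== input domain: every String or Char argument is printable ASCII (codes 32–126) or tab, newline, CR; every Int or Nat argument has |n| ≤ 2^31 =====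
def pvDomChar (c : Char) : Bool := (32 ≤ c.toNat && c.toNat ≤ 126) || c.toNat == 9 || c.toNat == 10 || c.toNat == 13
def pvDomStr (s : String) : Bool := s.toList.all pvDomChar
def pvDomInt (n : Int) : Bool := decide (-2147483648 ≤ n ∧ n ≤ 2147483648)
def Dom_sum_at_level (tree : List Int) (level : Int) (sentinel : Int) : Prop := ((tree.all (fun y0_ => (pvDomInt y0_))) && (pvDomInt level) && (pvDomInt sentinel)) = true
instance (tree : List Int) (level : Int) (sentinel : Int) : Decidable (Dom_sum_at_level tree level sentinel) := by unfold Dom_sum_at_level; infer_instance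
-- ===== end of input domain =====

-- B replaces A's doubling loop and index-guarded summation loop with a closed-form
-- index range and a filtered sum over a clipped slice (objective: simpler).


-- ===== PORT A =====
-- while lv < level: start += nodes; nodes *= 2; lv += 1
def aLvLoop (level lv start nodes : Int) : Int × Int :=
  if lv < level then aLvLoop level (lv + 1) (start + nodes) (nodes * 2)
  else (start, nodes)
termination_by (level - lv).toNat
decreasing_by omega

-- while i < stop and i < len(tree): if tree[i] != sentinel: total += tree[i]; i += 1
def aSumLoop (tree : List Int) (sentinel stop i total : Int) : Int :=
  if _h : i < stop ∧ i < (tree.length : Int) then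
    aSumLoop tree sentinel stop (i + 1)
      (if PySem.List.pyGetD tree i 0 ≠ sentinel then total + PySem.List.pyGetD tree i 0 else total)
  else total
termination_by ((tree.length : Int) - i).toNat
decreasing_by omega

def sum_at_level (tree : List Int) (level : Int) (sentinel : Int) : Int :=
  let p := aLvLoop level 0 0 1
  aSumLoop tree sentinel (p.1 + p.2) p.1 0

-- ===== PORT B =====
def sum_at_level_alt (tree : List Int) (level : Int) (sentinel : Int) : Int :=
  let p : Int × Int := if level ≤ 0 then (0, 1) else (2 ^ level.toNat - 1, 2 ^ level.toNat)
  ((PySem.List.slice tree (some p.1) (some (p.1 + p.2))).filter (fun x => x ≠ sentinel)).sum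

-- ===== PRECONDITION & SPEC =====
def Spec_sum_at_level (tree : List Int) (level : Int) (sentinel : Int) (out : Int) : Prop := out = sum_at_level_alt tree level sentinel
instance (tree : List Int) (level : Int) (sentinel : Int) (out : Int) : Decidable (Spec_sum_at_level tree level sentinel out) := by unfold Spec_sum_at_level; infer_instance

-- ===== CLAIM (what is proved, stated in full; the proofs are below) =====
def Claim_equal_sum_at_level : Prop := ∀ (tree : List Int) (level : Int) (sentinel : Int), Dom_sum_at_level tree level sentinel → Spec_sum_at_level tree level sentinel (sum_at_level tree level sentinel)

-- ===== LEMMAS AND PROOFS =====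

-- A's first loop computes start = start₀ + nodes₀·(2^n − 1), nodes = nodes₀·2^n after n iterations.
theorem aLvLoop_eq (n : Nat) : ∀ (lv start nodes : Int),
    aLvLoop (lv + n) lv start nodes = (start + nodes * (2 ^ n - 1), nodes * 2 ^ n) := by
  induction n with
  | zero => intro lv start nodes; unfold aLvLoop; simp
  | succ n ih =>
    intro lv start nodes
    unfold aLvLoop
    rw [if_pos (by push_cast; omega)]
    have : lv + (↑(n + 1) : Int) = (lv + 1) + ↑n := by push_cast; ring
    rw [this, ih (lv + 1) (start + nodes) (nodes * 2)]
    rw [Prod.mk.injEq]; constructor <;> ring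

-- A's second loop equals total plus the filtered sum of the clipped segment [m, s).
theorem aSumLoop_eq (tree : List Int) (sentinel : Int) (s : Nat) : ∀ (m : Nat) (total : Int),
    aSumLoop tree sentinel (s : Int) (m : Int) total
      = total + (((tree.drop m).take (s - m)).filter (fun x => x ≠ sentinel)).sum := by
  intro m
  induction hn : tree.length - m using Nat.strong_induction_on generalizing m with
  | _ n ih =>
    intro total
    unfold aSumLoop
    by_cases h : (m : Int) < (s : Int) ∧ (m : Int) < (tree.length : Int)
    · rw [dif_pos h]
      have hm : m < tree.length := by exact_mod_cast h.2
      have hms : m < s := by exact_mod_cast h.1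
      have hget : PySem.List.pyGetD tree (m : Int) 0 = tree[m] := by
        rw [PySem.List.pyGetD_eq_getElem (h0 := by exact_mod_cast Int.natCast_nonneg m) (h1 := h.2)]
        simp
      have hcast : (m : Int) + 1 = ((m + 1 : Nat) : Int) := by push_cast; ring
      rw [hget, hcast, ih (tree.length - (m + 1)) (by omega) (m + 1) rfl]
      rw [List.drop_eq_getElem_cons hm]
      have hsm : s - m = (s - (m + 1)) + 1 := by omega
      rw [hsm, List.take_succ_cons, List.filter_cons]
      by_cases hx : tree[m] = sentinel
      · simp [hx]
      · simp [hx]; ring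
    · rw [dif_neg h]
      rcases not_and_or.mp h with h1 | h1
      · have : s - m = 0 := by omega
        simp [this]
      · have : tree.length ≤ m := by omega
        simp [List.drop_eq_nil_of_le this]

-- the second loop over [st, st+ct) is the filtered sum of the slice tree[st : st+ct]
theorem aSumLoop_slice (tree : List Int) (sentinel : Int) (st ct : Nat) :
    aSumLoop tree sentinel ((st : Int) + (ct : Int)) (st : Int) 0
      = ((PySem.List.slice tree (some (st : Int)) (some ((st : Int) + (ct : Int)))).filter
          (fun x => x ≠ sentinel)).sum := by
  have h := aSumLoop_eq tree sentinel (st + ct) st 0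
  push_cast at h
  rw [h, show (st : Int) + (ct : Int) = ((st + ct : Nat) : Int) by push_cast; ring,
    PySem.List.slice_natCast]
  simp

-- ===== VERDICT (by name: the statement is the Claim_ definition above) =====
theorem sum_at_level_spec : Claim_equal_sum_at_level := by
  intro tree level sentinel _
  unfold Spec_sum_at_level sum_at_level sum_at_level_alt
  by_cases hl : level ≤ 0
  · have h1 : aLvLoop level 0 0 1 = (0, 1) := by unfold aLvLoop; rw [if_neg (by omega)]
    rw [if_pos hl, h1]
    have hk := aSumLoop_slice tree sentinel 0 1
    push_cast at hk ⊢
    exact hk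
  · replace hl : 0 < level := by omega
    set n := level.toNat with hn
    have hlev : level = (0 : Int) + (n : Int) := by omega
    have h1 : aLvLoop level 0 0 1 = ((2 : Int) ^ n - 1, 2 ^ n) := by
      rw [hlev, aLvLoop_eq n 0 0 1]; simp
    rw [if_neg (by omega), h1]
    have hpow : (1 : Nat) ≤ 2 ^ n := Nat.one_le_two_pow
    have hk := aSumLoop_slice tree sentinel (2 ^ n - 1) (2 ^ n)
    push_cast [hpow] at hk ⊢
    exact hk
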